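-- pv_equiv track=rewrite | github.com/seaglex/texas | texas/direct_calc.py | count_symbols
-- ===== SOURCE A (Python) =====
-- from collections import defaultdict
--
-- def count_symbols(cards):
--     """
--     :return: {symbol: count}, {symbol, max-digit}
--     """
--     sym_counts = defaultdict(int)
--     sym_max_digits = {}
--     for c in cards:
--         sym_counts[c[0]] += 1
--         if c[0] not in sym_max_digits:
--             sym_max_digits[c[0]] = c[1]
--         else:
--             sym_max_digits[c[0]] = max(c[1], sym_max_digits[c[0]])
--     return sym_counts, sym_max_digits
-- ===== SOURCE B (Python) =====
-- from collections import defaultdict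
--
-- def count_symbols(cards):
--     """
--     :return: {symbol: count}, {symbol, max-digit}
--     """
--     groups = defaultdict(list)
--     for sym, d in cards:
--         groups[sym].append(d)
--     sym_counts = defaultdict(int)
--     sym_max_digits = {}
--     for sym, v in groups.items():
--         sym_counts[sym] = len(v)
--         sym_max_digits[sym] = max(v)
--     return sym_counts, sym_max_digits
-- ===== Notes on version B (the rewrite author's own statement) =====
-- stated objective: alternative
-- what changed: B first builds a symbol->list-of-digits grouping index in one pass, then derives counts (len) and maxes (max) in a second pass over the groups, instead of A's incrementally maintained count and running max.
import Mathlib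
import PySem

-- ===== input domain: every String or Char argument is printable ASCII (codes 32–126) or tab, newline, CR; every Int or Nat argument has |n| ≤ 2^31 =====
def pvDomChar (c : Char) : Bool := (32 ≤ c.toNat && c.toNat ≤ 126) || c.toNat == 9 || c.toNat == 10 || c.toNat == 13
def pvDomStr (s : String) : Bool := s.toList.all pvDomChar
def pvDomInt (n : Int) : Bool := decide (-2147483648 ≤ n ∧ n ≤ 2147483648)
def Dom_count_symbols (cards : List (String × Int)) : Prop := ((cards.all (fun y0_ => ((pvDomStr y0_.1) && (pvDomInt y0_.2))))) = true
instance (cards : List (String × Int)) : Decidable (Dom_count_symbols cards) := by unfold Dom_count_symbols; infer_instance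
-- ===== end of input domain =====

-- B builds a symbol -> list-of-digits grouping index first and derives counts and maxes in a
-- second pass over the groups, instead of A's incrementally maintained count and running max
-- (objective: alternative; same asymptotic cost).

-- ===== PORT A =====
-- one loop updating both dicts; defaultdict(int) lookup is getD _ 0;
-- 'max(c[1], sym_max_digits[c[0]])' reads an existing key, so its 'getD _ 0' never yields the default
def count_symbols (cards : List (String × Int)) : (List (String × Int)) × (List (String × Int)) :=
  let r := cards.foldl
    (fun (p : PySem.Dict String Int × PySem.Dict String Int) c =>
      (p.1.modify c.1 0 (· + 1),
       if p.2.contains c.1 = false then p.2.insert c.1 c.2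
       else p.2.insert c.1 (max c.2 (p.2.getD c.1 0))))
    (PySem.Dict.empty, PySem.Dict.empty)
  (r.1.items, r.2.items)

-- ===== PORT B =====
-- groups[sym].append(d) is modify sym [] (· ++ [d]); one second loop over groups.items() builds both dicts;
-- 'max(v)' is PySem.List.max? with identity key; v is never empty, so its '.getD 0' never yields the default
def count_symbols_alt (cards : List (String × Int)) : (List (String × Int)) × (List (String × Int)) :=
  let groups := cards.foldl
    (fun (d : PySem.Dict String (List Int)) p => d.modify p.1 [] (· ++ [p.2]))
    PySem.Dict.empty
  let r := groups.items.foldl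
    (fun (q : PySem.Dict String Int × PySem.Dict String Int) kv =>
      (q.1.insert kv.1 (kv.2.length : Int),
       q.2.insert kv.1 ((PySem.List.max? kv.2 id).getD 0)))
    (PySem.Dict.empty, PySem.Dict.empty)
  (r.1.items, r.2.items)

-- ===== PRECONDITION & SPEC =====
def Spec_count_symbols (cards : List (String × Int)) (out : (List (String × Int)) × (List (String × Int))) : Prop := out = count_symbols_alt cards
instance (cards : List (String × Int)) (out : (List (String × Int)) × (List (String × Int))) : Decidable (Spec_count_symbols cards out) := by unfold Spec_count_symbols; infer_instance

-- ===== CLAIM (what is proved, stated in full; the proofs are below) =====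
def Claim_equal_count_symbols : Prop := ∀ (cards : List (String × Int)), Dom_count_symbols cards → Spec_count_symbols cards (count_symbols cards)

-- ===== LEMMAS AND PROOFS =====

def pvGrp (k : String) (cards : List (String × Int)) : List Int :=
  (cards.filter (fun p => p.1 == k)).map (·.2)

theorem pvGrp_cons (k : String) (c : (String × Int)) (cs : List (String × Int)) :
    pvGrp k (c :: cs) = if c.1 == k then c.2 :: pvGrp k cs else pvGrp k cs := by
  simp [pvGrp, List.filter_cons]; split <;> simp

theorem pvMax?_step (x y : Int) (ys : List Int) :
    PySem.List.max? (x :: y :: ys) id = PySem.List.max? (max x y :: ys) id := by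
  simp only [PySem.List.max?, List.foldl_cons]
  congr 1
  by_cases h : x < y
  · simp [h, max_eq_right h.le]
  · simp [h, max_eq_left (not_lt.mp h)]

theorem pvMax?_cons (x : Int) (xs : List Int) :
    PySem.List.max? (x :: xs) id = some (xs.foldl max x) := by
  induction xs generalizing x with
  | nil => rfl
  | cons y ys ih => rw [pvMax?_step, ih (max x y)]; rfl

theorem pvCount_eq (k : String) (cards : List (String × Int)) :
    (cards.map (·.1)).count k = (pvGrp k cards).length := by
  induction cards with
  | nil => simp [pvGrp]
  | cons c cs ih =>
    rw [List.map_cons, pvGrp_cons]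
    by_cases h : c.1 = k
    · simp [h, ih]
    · simp [h, ih]

theorem pvSmd_get? (cards : List (String × Int)) : ∀ (d : PySem.Dict String Int) (k : String),
    (cards.foldl
      (fun (d : PySem.Dict String Int) c =>
        if d.contains c.1 = false then d.insert c.1 c.2
        else d.insert c.1 (max c.2 (d.getD c.1 0))) d).get? k =
      match d.get? k with
      | some v => some ((pvGrp k cards).foldl max v)
      | none => match pvGrp k cards with
        | [] => none
        | x :: xs => some (xs.foldl max x)
    := by
  induction cards with
  | nil =>
    intro d k
    cases hd : d.get? k <;> simp [pvGrp, hd]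
  | cons c cs ih =>
    obtain ⟨c1, c2⟩ := c
    intro d k
    simp only [List.foldl_cons]
    rw [ih]
    by_cases hc : c1 = k
    · subst hc
      cases hd : d.get? c1 with
      | none =>
        have hcont : d.contains c1 = false := by
          rw [PySem.Dict.contains_eq_isSome_get?, hd]; rfl
        rw [if_pos hcont, PySem.Dict.get?_insert, if_pos rfl, pvGrp_cons]
        simp
      | some v =>
        have hcont : d.contains c1 = true := by
          rw [PySem.Dict.contains_eq_isSome_get?, hd]; rfl
        have hgd : d.getD c1 0 = v := PySem.Dict.getD_of_get?_eq_some d 0 hd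
        rw [if_neg (by simp [hcont]), PySem.Dict.get?_insert, if_pos rfl, hgd, pvGrp_cons]
        simp only [beq_self_eq_true, if_pos, List.foldl_cons]
        rw [max_comm v c2]
    · have hne : k ≠ c1 := fun h => hc h.symm
      have hgrp : pvGrp k ((c1, c2) :: cs) = pvGrp k cs := by
        rw [pvGrp_cons, if_neg (by simp [hc])]
      rw [hgrp]
      by_cases hct : d.contains c1 = false
      · rw [if_pos hct, PySem.Dict.get?_insert, if_neg hne]
      · rw [if_neg hct, PySem.Dict.get?_insert, if_neg hne]

-- ===== VERDICT (by name: the statement is the Claim_ definition above) =====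
theorem count_symbols_spec : Claim_equal_count_symbols := by
  unfold Claim_equal_count_symbols
  intro cards _
  unfold Spec_count_symbols count_symbols count_symbols_alt
  show ((List.foldl
      (fun (p : PySem.Dict String Int × PySem.Dict String Int) (c : String × Int) =>
        (p.1.modify c.1 0 (· + 1),
         if p.2.contains c.1 = false then p.2.insert c.1 c.2
         else p.2.insert c.1 (max c.2 (p.2.getD c.1 0))))
      (PySem.Dict.empty, PySem.Dict.empty) cards).1.items,
    (List.foldl
      (fun (p : PySem.Dict String Int × PySem.Dict String Int) (c : String × Int) =>
        (p.1.modify c.1 0 (· + 1),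
         if p.2.contains c.1 = false then p.2.insert c.1 c.2
         else p.2.insert c.1 (max c.2 (p.2.getD c.1 0))))
      (PySem.Dict.empty, PySem.Dict.empty) cards).2.items) =
    ((List.foldl
      (fun (q : PySem.Dict String Int × PySem.Dict String Int) (kv : String × List Int) =>
        (q.1.insert kv.1 (kv.2.length : Int),
         q.2.insert kv.1 ((PySem.List.max? kv.2 id).getD 0)))
      (PySem.Dict.empty, PySem.Dict.empty)
      ((List.foldl (fun (d : PySem.Dict String (List Int)) p => d.modify p.1 [] fun x => x ++ [p.2]) PySem.Dict.empty cards).items)).1.items,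
    (List.foldl
      (fun (q : PySem.Dict String Int × PySem.Dict String Int) (kv : String × List Int) =>
        (q.1.insert kv.1 (kv.2.length : Int),
         q.2.insert kv.1 ((PySem.List.max? kv.2 id).getD 0)))
      (PySem.Dict.empty, PySem.Dict.empty)
      ((List.foldl (fun (d : PySem.Dict String (List Int)) p => d.modify p.1 [] fun x => x ++ [p.2]) PySem.Dict.empty cards).items)).2.items)
  rw [PySem.List.foldl_prod_mk
        (fun (d : PySem.Dict String Int) (c : String × Int) => d.modify c.1 0 (· + 1))
        (fun (d : PySem.Dict String Int) (c : String × Int) =>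
          if d.contains c.1 = false then d.insert c.1 c.2
          else d.insert c.1 (max c.2 (d.getD c.1 0)))
        cards PySem.Dict.empty PySem.Dict.empty,
      PySem.List.foldl_prod_mk
        (fun (d : PySem.Dict String Int) (kv : String × List Int) => d.insert kv.1 ((kv.2.length : Int)))
        (fun (d : PySem.Dict String Int) (kv : String × List Int) => d.insert kv.1 ((PySem.List.max? kv.2 id).getD 0))
        ((List.foldl (fun d p => d.modify p.1 [] fun x => x ++ [p.2]) PySem.Dict.empty cards).items)
        PySem.Dict.empty PySem.Dict.empty]
  set groups := List.foldl (fun (d : PySem.Dict String (List Int)) p => d.modify p.1 [] fun x => x ++ [p.2]) PySem.Dict.empty cards with hgroups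
  -- groups facts
  have hgk : groups.keys = PySem.Set.ofList (cards.map (·.1)) := by
    rw [hgroups, PySem.Dict.keys_foldl_modify_key cards (·.1) [] (fun _ p => fun x => x ++ [p.2]),
      PySem.Dict.keys_empty, PySem.Set.update_nil_left]
  have hgn : groups.keys.Nodup := by
    rw [hgroups]
    exact PySem.Dict.nodup_keys_foldl_modify_key cards (·.1) [] _ _ (by simp [PySem.Dict.keys_empty])
  have hgd : ∀ k, groups.getD k [] = pvGrp k cards := by
    intro k
    rw [hgroups, PySem.Dict.getD_foldl_modify_append, PySem.Dict.getD_empty]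
    rfl
  have hitems : groups.items = (PySem.Set.ofList (cards.map (·.1))).map (fun k => (k, pvGrp k cards)) := by
    rw [PySem.Dict.items_eq_map_keys groups hgn [], hgk]
    exact List.map_congr_left (fun k _ => by rw [hgd k])
  have hks : groups.items.map (·.1) = PySem.Set.ofList (cards.map (·.1)) := by
    rw [hitems, List.map_map]
    exact List.map_id _
  -- second-phase folds over fresh, distinct keys just append their pairs
  have hfresh1 : (List.foldl (fun (d : PySem.Dict String Int) (kv : String × List Int) =>
        d.insert kv.1 ((kv.2.length : Int))) PySem.Dict.empty groups.items).items
      = groups.items.map (fun kv => (kv.1, (kv.2.length : Int))) := by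
    rw [PySem.Dict.items_foldl_insert_fresh groups.items (·.1) (fun kv => ((kv.2 : List Int).length : Int))
        PySem.Dict.empty (fun a _ => PySem.Dict.contains_empty a.1) (by exact hgn)]
    rfl
  have hfresh2 : (List.foldl (fun (d : PySem.Dict String Int) (kv : String × List Int) =>
        d.insert kv.1 ((PySem.List.max? kv.2 id).getD 0)) PySem.Dict.empty groups.items).items
      = groups.items.map (fun kv => (kv.1, (PySem.List.max? kv.2 id).getD 0)) := by
    rw [PySem.Dict.items_foldl_insert_fresh groups.items (·.1)
        (fun kv => (PySem.List.max? (kv.2 : List Int) id).getD 0)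
        PySem.Dict.empty (fun a _ => PySem.Dict.contains_empty a.1) (by exact hgn)]
    rfl
  -- A's count dict is Counter(cards.map fst)
  have hA1 : (List.foldl (fun (d : PySem.Dict String Int) (c : String × Int) =>
        d.modify c.1 0 (· + 1)) PySem.Dict.empty cards).items
      = (PySem.Set.ofList (cards.map (·.1))).map
          (fun k => (k, ((cards.map (·.1)).count k : Int))) := by
    rw [← List.foldl_map (f := fun (x : String × Int) => x.1)
          (g := fun (d : PySem.Dict String Int) (x : String) => d.modify x 0 (· + 1)),
        ← PySem.Dict.counter_eq_foldl, PySem.Dict.items_counter]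
  -- A's running-max dict: same key as insert with a merged value
  have hstep : (fun (d : PySem.Dict String Int) (c : String × Int) =>
        if d.contains c.1 = false then d.insert c.1 c.2
        else d.insert c.1 (max c.2 (d.getD c.1 0)))
      = fun (d : PySem.Dict String Int) (c : String × Int) =>
        d.insert c.1 (if d.contains c.1 = false then c.2 else max c.2 (d.getD c.1 0)) := by
    funext d c; split <;> rfl
  have hA2n : (List.foldl (fun (d : PySem.Dict String Int) (c : String × Int) =>
        if d.contains c.1 = false then d.insert c.1 c.2
        else d.insert c.1 (max c.2 (d.getD c.1 0))) PySem.Dict.empty cards).keys.Nodup := by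
    rw [hstep]
    exact PySem.Dict.nodup_keys_foldl_insert_key cards (·.1) _ _ (by simp [PySem.Dict.keys_empty])
  have hA2k : (List.foldl (fun (d : PySem.Dict String Int) (c : String × Int) =>
        if d.contains c.1 = false then d.insert c.1 c.2
        else d.insert c.1 (max c.2 (d.getD c.1 0))) PySem.Dict.empty cards).keys
      = PySem.Set.ofList (cards.map (·.1)) := by
    rw [hstep, PySem.Dict.keys_foldl_insert_key cards (·.1) _ PySem.Dict.empty,
      PySem.Dict.keys_empty, PySem.Set.update_nil_left]
  have hA2 : (List.foldl (fun (d : PySem.Dict String Int) (c : String × Int) =>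
        if d.contains c.1 = false then d.insert c.1 c.2
        else d.insert c.1 (max c.2 (d.getD c.1 0))) PySem.Dict.empty cards).items
      = (PySem.Set.ofList (cards.map (·.1))).map
          (fun k => (k, (match pvGrp k cards with
            | [] => (0 : Int)
            | x :: xs => xs.foldl max x))) := by
    rw [PySem.Dict.items_eq_map_keys _ hA2n 0, hA2k]
    refine List.map_congr_left (fun k _ => ?_)
    rw [PySem.Dict.getD_eq_get?_getD, pvSmd_get? cards PySem.Dict.empty k, PySem.Dict.get?_empty]
    cases pvGrp k cards <;> rfl
  rw [hfresh1, hfresh2, hA1, hA2, hitems, List.map_map, List.map_map]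
  have hmem : ∀ k ∈ PySem.Set.ofList (cards.map (·.1)), pvGrp k cards ≠ [] := by
    intro k hk
    have : k ∈ cards.map (·.1) := (PySem.Set.mem_ofList _ _).mp hk
    have hc := List.count_pos_iff.mpr this
    rw [pvCount_eq] at hc
    exact fun h => by simp [h] at hc
  refine Prod.ext ?_ ?_
  · refine List.map_congr_left (fun k hk => ?_)
    simp only [Function.comp]
    rw [pvCount_eq]
  · refine List.map_congr_left (fun k hk => ?_)
    simp only [Function.comp]
    cases heq : pvGrp k cards with
    | nil => exact absurd heq (hmem k hk)
    | cons x xs => rw [pvMax?_cons]; rfl
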